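-- pv_equiv track=rewrite | github.com/IKAROSOO/CodingTest | Programmers/Lv1 문제/42862_02.py | solution
-- ===== SOURCE A (Python) =====
-- def solution(n, lost, reverse):
--     '''도난당한 학생과 여벌 옷을 가져온 학생 목록을 활용하여
--     최대한 많은 학생이 체육복을 입을 수 있도록 배분'''
--
--     reverse_set = set(reverse) - set(lost)
--     # reverse에 속하면서 lost에도 속하는 element 제거
--     lost_set = set(lost) - set(reverse)
--     # 위에서 제거한 element를 반영
--
--     for r in sorted(reverse_set):
--         if r-1 in lost_set:
--             lost_set.remove(r-1)
--         elif r+1 in lost_set: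
--             lost_set.remove(r+1)
--
--     return n - len(lost_set)
-- ===== SOURCE B (Python) =====
-- def solution(n, lost, reverse):
--     # One pass over the sorted reserves with O(1) extra state instead of
--     # mutating a lost-set: count successful loans directly.
--     L = set(lost) - set(reverse)
--     R = set(reverse) - set(lost)
--     lent = 0
--     last = None        # previously processed reserve student
--     took_right = False # did `last` lend to student last+1?
--     for r in sorted(R):
--         if r - 1 in L and not (took_right and last == r - 2):
--             lent += 1
--             took_right = False
--         elif r + 1 in L:
--             lent += 1
--             took_right = True
--         else:
--             took_right = False
--         last = r
--     return n - len(L) + lent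
-- ===== Notes on version B (the rewrite author's own statement) =====
-- stated objective: alternative
-- what changed: A mutates a lost-set while scanning the sorted reserves and returns n minus the leftovers; B scans the same sorted reserves with O(1) state (last reserve, whether it lent rightward) and counts successful loans directly, returning n - |lost-set| + loans.
import Mathlib
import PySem

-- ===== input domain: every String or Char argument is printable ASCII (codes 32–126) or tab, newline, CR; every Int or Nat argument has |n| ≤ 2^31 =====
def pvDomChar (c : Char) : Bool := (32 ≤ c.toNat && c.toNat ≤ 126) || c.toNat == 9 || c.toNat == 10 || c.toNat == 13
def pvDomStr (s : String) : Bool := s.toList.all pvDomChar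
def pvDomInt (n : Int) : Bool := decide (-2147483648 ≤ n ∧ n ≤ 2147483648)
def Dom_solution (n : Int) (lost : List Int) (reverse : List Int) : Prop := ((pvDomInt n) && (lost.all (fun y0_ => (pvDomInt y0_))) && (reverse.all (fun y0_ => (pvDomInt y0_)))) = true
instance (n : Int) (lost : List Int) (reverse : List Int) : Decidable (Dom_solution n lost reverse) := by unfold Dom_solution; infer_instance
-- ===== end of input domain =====

-- B replaces A's mutated lost-set (answer = n - leftovers) by a single scan over the
-- sorted reserves with O(1) extra state that counts successful loans (alternative).

-- ===== PORT A =====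
-- A's loop body; the guarded 'lost_set.remove(x)' (only executed when 'x in lost_set')
-- is ported as Set.discard, which is exact under that guard.
def pvStepA (S : PySem.Set Int) (r : Int) : PySem.Set Int :=
  if PySem.Set.contains S (r - 1) then PySem.Set.discard S (r - 1)
  else if PySem.Set.contains S (r + 1) then PySem.Set.discard S (r + 1)
  else S

def solution (n : Int) (lost : List Int) (reverse : List Int) : Int :=
  let reverseSet : PySem.Set Int := PySem.Set.diff (PySem.Set.ofList reverse) (PySem.Set.ofList lost)
  let lostSet0 : PySem.Set Int := PySem.Set.diff (PySem.Set.ofList lost) (PySem.Set.ofList reverse)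
  let lostSet : PySem.Set Int :=
    (PySem.List.sorted reverseSet (fun x => x) false).foldl pvStepA lostSet0
  n - PySem.Set.len lostSet

-- ===== PORT B =====
-- B's loop body: state (lent, last, tookRight).
def pvStepB (L : PySem.Set Int) (st : Int × Option Int × Bool) (r : Int) : Int × Option Int × Bool :=
  let (lent, last, tookRight) := st
  if PySem.Set.contains L (r - 1) && !(tookRight && last == some (r - 2)) then
    (lent + 1, some r, false)
  else if PySem.Set.contains L (r + 1) then
    (lent + 1, some r, true)
  else (lent, some r, false)

def solution_alt (n : Int) (lost : List Int) (reverse : List Int) : Int :=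
  let L : PySem.Set Int := PySem.Set.diff (PySem.Set.ofList lost) (PySem.Set.ofList reverse)
  let R : PySem.Set Int := PySem.Set.diff (PySem.Set.ofList reverse) (PySem.Set.ofList lost)
  let st : Int × Option Int × Bool :=
    (PySem.List.sorted R (fun x => x) false).foldl (pvStepB L) (0, none, false)
  n - PySem.Set.len L + st.1

-- ===== PRECONDITION & SPEC =====
def Spec_solution (n : Int) (lost : List Int) (reverse : List Int) (out : Int) : Prop := out = solution_alt n lost reverse
instance (n : Int) (lost : List Int) (reverse : List Int) (out : Int) : Decidable (Spec_solution n lost reverse out) := by unfold Spec_solution; infer_instance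

-- ===== CLAIM (what is proved, stated in full; the proofs are below) =====
def Claim_equal_solution : Prop := ∀ (n : Int) (lost : List Int) (reverse : List Int), Dom_solution n lost reverse → Spec_solution n lost reverse (solution n lost reverse)

-- ===== LEMMAS AND PROOFS =====

-- The invariant tying A's remaining lost-set S to B's state (lent, last, tookRight):
-- S is L minus the matched students; every matched student is ≤ last+1; last+1 is
-- matched exactly when tookRight records that `last` lent to its right neighbour.
def pvInv (L S : List Int) (lent : Int) (last : Option Int) (tookRight : Bool) : Prop :=
  S.Sublist L ∧ (S.length : Int) = (L.length : Int) - lent ∧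
  (match last with
   | none => S = L ∧ lent = 0 ∧ tookRight = false
   | some b => b ∉ L ∧ (∀ x ∈ L, x ∉ S → x ≤ b + 1) ∧ ((b + 1 ∈ L ∧ b + 1 ∉ S) ↔ tookRight = true))

theorem pvDiscard_eq_erase {S : List Int} (h : S.Nodup) (x : Int) :
    PySem.Set.discard S x = S.erase x := by
  rw [List.Nodup.erase_eq_filter h]
  simp [PySem.Set.discard]
  rfl

theorem pvMain (L : List Int) (hL : L.Nodup) (rs : List Int)
    (hs : rs.Pairwise (· < ·)) (hrsL : ∀ r ∈ rs, r ∉ L)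
    (S : List Int) (lent : Int) (last : Option Int) (tookRight : Bool)
    (hgt : ∀ r ∈ rs, ∀ b, last = some b → b < r)
    (hinv : pvInv L S lent last tookRight) :
    ((rs.foldl pvStepA S).length : Int) =
      (L.length : Int) - (rs.foldl (pvStepB L) (lent, last, tookRight)).1 := by
  induction rs generalizing S lent last tookRight with
  | nil => exact hinv.2.1
  | cons r rest ih =>
    obtain ⟨hsub, hlen, hlast⟩ := hinv
    have hSnd : S.Nodup := hsub.nodup hL
    have hmemS : ∀ x, x ∈ S → x ∈ L := fun x hx => hsub.subset hx
    have hrL : r ∉ L := hrsL r (List.mem_cons_self)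
    have hrest : ∀ r' ∈ rest, r < r' := fun r' h => (List.pairwise_cons.1 hs).1 r' h
    have hs' : rest.Pairwise (· < ·) := (List.pairwise_cons.1 hs).2
    have hrsL' : ∀ r' ∈ rest, r' ∉ L := fun r' h => hrsL r' (List.mem_cons_of_mem _ h)
    have hgt' : ∀ r' ∈ rest, ∀ b, (some r : Option Int) = some b → b < r' := by
      intro r' h b hb; cases hb; exact hrest r' h
    -- r-1 is still in S iff it is in L and was not already taken by reserve r-2
    have hkeyL : (r - 1 ∈ L ∧ r - 1 ∉ S) → (tookRight = true ∧ last = some (r - 2)) := by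
      intro ⟨h1, h2⟩
      match last, hlast with
      | none, ⟨hSL, _, _⟩ => exact absurd (hSL ▸ h2) (not_not_intro h1)
      | some b, ⟨hbL, hbd, hiff⟩ =>
        have hb1 : r - 1 ≤ b + 1 := hbd _ h1 h2
        have hblt : b < r := hgt r List.mem_cons_self b rfl
        have hbne : b ≠ r - 1 := fun h => hbL (h ▸ h1)
        have hbeq : b + 1 = r - 1 := by omega
        refine ⟨hiff.1 ⟨by rw [hbeq]; exact h1, by rw [hbeq]; exact h2⟩, ?_⟩
        rw [show b = r - 2 by omega]
    -- r+1 was never removed so far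
    have hkeyR : r + 1 ∈ L → r + 1 ∈ S := by
      intro h1
      by_contra h2
      match last, hlast with
      | none, ⟨hSL, _, _⟩ => exact h2 (hSL ▸ h1)
      | some b, ⟨hbL, hbd, hiff⟩ =>
        have := hbd _ h1 h2
        have hblt : b < r := hgt r List.mem_cons_self b rfl
        omega
    simp only [List.foldl_cons]
    by_cases hc1 : r - 1 ∈ S
    · -- A lends from the left; B's first branch fires too
      have hc1L : r - 1 ∈ L := hmemS _ hc1
      have hnot : ¬ (tookRight = true ∧ last = some (r - 2)) := by
        rintro ⟨ht, hl⟩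
        match last, hl, hlast with
        | some b, hl, ⟨hbL, hbd, hiff⟩ =>
          have hb : b + 1 = r - 1 := by injection hl with h; omega
          have := (hiff.2 ht).2
          rw [hb] at this
          exact this hc1
      have hA : pvStepA S r = S.erase (r - 1) := by
        unfold pvStepA
        rw [if_pos ((PySem.Set.contains_iff S (r - 1)).2 hc1)]
        exact pvDiscard_eq_erase hSnd _
      have hb2 : (tookRight && last == some (r - 2)) = false := by
        cases htr : tookRight with
        | false => simp
        | true =>
          cases hl : (last == some (r - 2)) with
          | false => simp
          | true => exact absurd ⟨htr, eq_of_beq hl⟩ hnot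
      have hB : pvStepB L (lent, last, tookRight) r = (lent + 1, some r, false) := by
        simp only [pvStepB]
        rw [(PySem.Set.contains_iff L (r - 1)).2 hc1L, hb2]
        simp
      rw [hA, hB]
      refine ih hs' hrsL' _ _ _ _ hgt' ⟨(List.erase_sublist).trans hsub, ?_, ?_, ?_, ?_⟩
      · have := List.length_erase_of_mem hc1
        have hpos : 0 < S.length := List.length_pos_of_mem hc1
        rw [this]
        omega
      · exact hrL
      · intro x hxL hx
        rcases Decidable.em (x = r - 1) with h | h
        · omega
        · have hxS : x ∉ S := fun hxs => hx ((List.mem_erase_of_ne h).2 hxs)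
          match last, hlast with
          | none, ⟨hSL, _, _⟩ => exact absurd (hSL ▸ hxL) hxS
          | some b, ⟨hbL, hbd, hiff⟩ =>
            have := hbd _ hxL hxS
            have hblt : b < r := hgt r List.mem_cons_self b rfl
            omega
      · constructor
        · rintro ⟨h1, h2⟩
          have hne : (r : Int) + 1 ≠ r - 1 := by omega
          have : r + 1 ∉ S := fun hs2 => h2 ((List.mem_erase_of_ne hne).2 hs2)
          exact absurd (hkeyR h1) this
        · intro h; exact absurd h (by decide)
    · have hcS1 : PySem.Set.contains S (r - 1) = false := by
        cases hc : PySem.Set.contains S (r - 1) with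
        | false => rfl
        | true => exact absurd ((PySem.Set.contains_iff S (r - 1)).1 hc) hc1
      have hBc1 : (PySem.Set.contains L (r - 1) && !(tookRight && last == some (r - 2))) = false := by
        rcases Decidable.em (r - 1 ∈ L) with h | h
        · obtain ⟨ht, hl⟩ := hkeyL ⟨h, hc1⟩
          simp [ht, hl]
        · have hcf : PySem.Set.contains L (r - 1) = false := by
            cases hc : PySem.Set.contains L (r - 1) with
            | false => rfl
            | true => exact absurd ((PySem.Set.contains_iff L (r - 1)).1 hc) h
          simp only [hcf, Bool.false_and]
      by_cases hc2 : r + 1 ∈ S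
      · -- A lends from the right; B's second branch fires
        have hc2L : r + 1 ∈ L := hmemS _ hc2
        have hA : pvStepA S r = S.erase (r + 1) := by
          unfold pvStepA
          rw [if_neg (by simp [hc1]), if_pos ((PySem.Set.contains_iff S (r + 1)).2 hc2)]
          exact pvDiscard_eq_erase hSnd _
        have hB : pvStepB L (lent, last, tookRight) r = (lent + 1, some r, true) := by
          simp only [pvStepB]
          rw [hBc1, (PySem.Set.contains_iff L (r + 1)).2 hc2L]
          simp
        rw [hA, hB]
        refine ih hs' hrsL' _ _ _ _ hgt' ⟨(List.erase_sublist).trans hsub, ?_, ?_, ?_, ?_⟩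
        · have := List.length_erase_of_mem hc2
          have hpos : 0 < S.length := List.length_pos_of_mem hc2
          rw [this]
          omega
        · exact hrL
        · intro x hxL hx
          rcases Decidable.em (x = r + 1) with h | h
          · omega
          · have hxS : x ∉ S := fun hxs => hx ((List.mem_erase_of_ne h).2 hxs)
            match last, hlast with
            | none, ⟨hSL, _, _⟩ => exact absurd (hSL ▸ hxL) hxS
            | some b, ⟨hbL, hbd, hiff⟩ =>
              have := hbd _ hxL hxS
              have hblt : b < r := hgt r List.mem_cons_self b rfl
              omega
        · constructor
          · intro _; rfl
          · intro _; exact ⟨hc2L, hSnd.not_mem_erase⟩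
      · -- no loan at r
        have hc2L : r + 1 ∉ L := fun h => hc2 (hkeyR h)
        have hA : pvStepA S r = S := by
          unfold pvStepA
          rw [if_neg (by simp [hc1]), if_neg]
          intro hc; exact hc2 ((PySem.Set.contains_iff S (r + 1)).1 hc)
        have hB : pvStepB L (lent, last, tookRight) r = (lent, some r, false) := by
          have h2 : PySem.Set.contains L (r + 1) = false := by
            cases hc : PySem.Set.contains L (r + 1) with
            | false => rfl
            | true => exact absurd ((PySem.Set.contains_iff L (r + 1)).1 hc) hc2L
          simp only [pvStepB]
          rw [hBc1, h2]
          simp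
        rw [hA, hB]
        refine ih hs' hrsL' _ _ _ _ hgt' ⟨hsub, hlen, ?_, ?_, ?_⟩
        · exact hrL
        · intro x hxL hx
          match last, hlast with
          | none, ⟨hSL, _, _⟩ => exact absurd (hSL ▸ hxL) hx
          | some b, ⟨hbL, hbd, hiff⟩ =>
            have := hbd _ hxL hx
            have hblt : b < r := hgt r List.mem_cons_self b rfl
            omega
        · constructor
          · rintro ⟨h1, _⟩; exact absurd h1 hc2L
          · intro h; exact absurd h (by decide)

theorem pvPairwiseLt (l : List Int) (h1 : l.Pairwise (· ≤ ·)) (h2 : l.Nodup) :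
    l.Pairwise (· < ·) :=
  (h1.and h2).imp (fun ⟨hle, hne⟩ => lt_of_le_of_ne hle hne)

theorem solution_spec : Claim_equal_solution := by
  intro n lost reverse _
  unfold Spec_solution
  simp only [solution, solution_alt]
  set L : PySem.Set Int := PySem.Set.diff (PySem.Set.ofList lost) (PySem.Set.ofList reverse) with hLdef
  set R : PySem.Set Int := PySem.Set.diff (PySem.Set.ofList reverse) (PySem.Set.ofList lost) with hRdef
  have hL : L.Nodup := PySem.Set.nodup_diff _ _ (PySem.Set.nodup_ofList _)
  have hR : R.Nodup := PySem.Set.nodup_diff _ _ (PySem.Set.nodup_ofList _)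
  set rs := PySem.List.sorted R (fun x => x) false with hrsdef
  have hsnd : rs.Nodup := (PySem.List.sorted_perm R (fun x => x) false).nodup_iff.2 hR
  have hs : rs.Pairwise (· < ·) :=
    pvPairwiseLt _ (PySem.List.sorted_pairwise R (fun x => x)) hsnd
  have hrsL : ∀ r ∈ rs, r ∉ L := by
    intro r hr hrL
    rw [hrsdef, PySem.List.mem_sorted R (fun x => x) false, hRdef] at hr
    rw [hLdef] at hrL
    simp [PySem.Set.mem_diff, PySem.Set.mem_ofList] at hr hrL
    exact hr.2 hrL.1
  have key := pvMain L hL rs hs hrsL L 0 none false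
    (by intro r _ b h; cases h) ⟨List.Sublist.refl L, by omega, rfl, rfl, rfl⟩
  simp only [PySem.Set.len] at key ⊢
  omega
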